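-- pv_equiv track=rewrite | github.com/Adinath-Jagtap/Python-beginner-to-advance-practice | DAY-4/4-count-vowels-consonants.py | vowels_consonants
-- ===== SOURCE A (Python) =====
-- def vowels_consonants(str):
--     vowels = []
--     consonants = []
--     for i in str:
--         if i.isalpha():
--             if i in "aeiouAEIOU":
--                 if i not in vowels: #to avoid duplicates
--                     vowels.append(i)
--             else:
--                 if i not in consonants: #to avoid duplicates
--                     consonants.append(i)
--     return vowels,consonants
-- ===== SOURCE B (Python) =====
-- def vowels_consonants(str):
--     uniq = list(dict.fromkeys(str))
--     vowels = [c for c in uniq if c.isalpha() and c in "aeiouAEIOU"]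
--     consonants = [c for c in uniq if c.isalpha() and c not in "aeiouAEIOU"]
--     return vowels, consonants
-- ===== Notes on version B (the rewrite author's own statement) =====
-- stated objective: simpler
-- what changed: Dedup is done once globally up front (ordered-unique table via dict.fromkeys) and the two result lists become plain filter passes over that table, instead of per-category membership tests against the growing output lists inside the classification loop.
import Mathlib
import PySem

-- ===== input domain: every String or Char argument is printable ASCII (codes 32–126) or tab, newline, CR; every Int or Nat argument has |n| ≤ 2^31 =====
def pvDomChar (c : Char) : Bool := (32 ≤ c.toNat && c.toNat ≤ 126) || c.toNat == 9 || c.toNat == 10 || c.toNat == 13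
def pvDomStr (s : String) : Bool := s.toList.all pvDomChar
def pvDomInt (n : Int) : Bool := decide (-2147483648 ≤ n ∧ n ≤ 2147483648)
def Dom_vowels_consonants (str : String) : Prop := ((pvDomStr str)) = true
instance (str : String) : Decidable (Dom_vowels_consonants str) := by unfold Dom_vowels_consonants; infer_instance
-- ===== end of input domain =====

-- B dedups the whole string once up front and partitions that ordered-unique table with two
-- filter passes, instead of A's per-category dedup inside the classification loop (objective: simpler).

-- ===== PORT A =====
-- the loop variable i is a 1-char string; `i in "aeiouAEIOU"` is substring membership, which for a
-- 1-char string is exactly char membership in the vowel characters (exact on this use)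
def vowels_consonants (str : String) : List String × List String :=
  str.toList.foldl
    (fun (st : List String × List String) c =>
      let i : String := String.ofList [c]
      if PySem.Str.strIsalpha i then
        if "aeiouAEIOU".toList.contains c then
          if st.1.contains i then st else (st.1 ++ [i], st.2)
        else
          if st.2.contains i then st else (st.1, st.2 ++ [i])
      else st)
    ([], [])

-- ===== PORT B =====
-- uniq = list(dict.fromkeys(str)) → PySem.List.dedup; each comprehension is a filter over uniq
-- (the elements, 1-char strings, are String.ofList [c])
def vowels_consonants_alt (str : String) : List String × List String :=
  let uniq : List Char := PySem.List.dedup str.toList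
  ((uniq.filter (fun c => PySem.Str.strIsalpha (String.ofList [c]) &&
      "aeiouAEIOU".toList.contains c)).map (fun c => String.ofList [c]),
   (uniq.filter (fun c => PySem.Str.strIsalpha (String.ofList [c]) &&
      !"aeiouAEIOU".toList.contains c)).map (fun c => String.ofList [c]))

-- ===== PRECONDITION & SPEC =====
def Spec_vowels_consonants (str : String) (out : List String × List String) : Prop := out = vowels_consonants_alt str
instance (str : String) (out : List String × List String) : Decidable (Spec_vowels_consonants str out) := by unfold Spec_vowels_consonants; infer_instance

-- ===== CLAIM (what is proved, stated in full; the proofs are below) =====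
def Claim_equal_vowels_consonants : Prop := ∀ (str : String), Dom_vowels_consonants str → Spec_vowels_consonants str (vowels_consonants str)

-- ===== LEMMAS AND PROOFS =====

-- the two filter predicates of B, named for the proofs
def pvP (c : Char) : Bool :=
  PySem.Str.strIsalpha (String.ofList [c]) && "aeiouAEIOU".toList.contains c
def pvQ (c : Char) : Bool :=
  PySem.Str.strIsalpha (String.ofList [c]) && !"aeiouAEIOU".toList.contains c

theorem pv_mk_mem_map (c : Char) (l : List Char) :
    ((l.map (fun c => String.ofList [c])).contains (String.ofList [c])) = l.contains c := by
  induction l with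
  | nil => rfl
  | cons a t ih =>
    simp only [List.map_cons, List.contains_cons, ih]
    congr 1
    by_cases h : a = c
    · subst h; simp
    · have hs : (String.ofList [c] == String.ofList [a]) = false := by
        rw [beq_eq_false_iff_ne]
        intro he
        apply h
        have ht := congrArg String.toList he
        simp at ht
        exact ht.symm
      rw [hs, beq_eq_false_iff_ne.mpr (fun hx => h hx.symm)]

theorem pv_contains_filter_true (u : List Char) (c : Char) (p : Char → Bool)
    (hm : c ∈ u) (hp : p c = true) : (u.filter p).contains c = true := by
  rw [List.contains_iff_mem]; exact List.mem_filter.mpr ⟨hm, hp⟩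

theorem pv_contains_filter_false (u : List Char) (c : Char) (p : Char → Bool)
    (hm : c ∉ u) : (u.filter p).contains c = false := by
  rw [Bool.eq_false_iff]; intro h
  exact hm (List.mem_filter.mp (List.contains_iff_mem.mp h)).1

theorem pv_add_of_mem (u : List Char) (c : Char) (hm : c ∈ u) : PySem.Set.add u c = u := by
  simp only [PySem.Set.add, (PySem.Set.contains_iff u c).mpr hm, if_true]

theorem pv_add_of_not_mem (u : List Char) (c : Char) (hm : c ∉ u) :
    PySem.Set.add u c = u ++ [c] := by
  have hc : PySem.Set.contains u c = false := by
    rw [Bool.eq_false_iff]; intro h; exact hm ((PySem.Set.contains_iff u c).mp h)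
  simp only [PySem.Set.add, hc, Bool.false_eq_true, if_false]

-- loop invariant: A's state after consuming a prefix equals the two filters of the
-- ordered-unique table of the chars seen so far (u)
theorem pv_loop (l u : List Char) :
    l.foldl
      (fun (st : List String × List String) c =>
        let i : String := String.ofList [c]
        if PySem.Str.strIsalpha i then
          if "aeiouAEIOU".toList.contains c then
            if st.1.contains i then st else (st.1 ++ [i], st.2)
          else
            if st.2.contains i then st else (st.1, st.2 ++ [i])
        else st)
      ((u.filter pvP).map (fun c => String.ofList [c]),
       (u.filter pvQ).map (fun c => String.ofList [c]))
    = (((l.foldl PySem.Set.add u).filter pvP).map (fun c => String.ofList [c]),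
       ((l.foldl PySem.Set.add u).filter pvQ).map (fun c => String.ofList [c])) := by
  induction l generalizing u with
  | nil => simp
  | cons c l ih =>
    simp only [List.foldl_cons]
    by_cases hal : PySem.Str.strIsalpha (String.ofList [c]) = true
    · by_cases hv : ("aeiouAEIOU".toList.contains c) = true
      · -- vowel branch
        have hp : pvP c = true := by unfold pvP; rw [hal, hv]; rfl
        have hq : pvQ c = false := by unfold pvQ; rw [hal, hv]; rfl
        by_cases hm : c ∈ u
        · have hmem : ((u.filter pvP).map (fun c => String.ofList [c])).contains (String.ofList [c]) = true := by
            rw [pv_mk_mem_map]; exact pv_contains_filter_true u c pvP hm hp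
          simp only [hal, hv, if_true, hmem, pv_add_of_mem u c hm]
          exact ih u
        · have hmem : ((u.filter pvP).map (fun c => String.ofList [c])).contains (String.ofList [c]) = false := by
            rw [pv_mk_mem_map]; exact pv_contains_filter_false u c pvP hm
          simp only [hal, hv, if_true, hmem, Bool.false_eq_true, if_false,
            pv_add_of_not_mem u c hm]
          have h1 : (u ++ [c]).filter pvP = u.filter pvP ++ [c] := by
            simp [List.filter_append, hp]
          have h2 : (u ++ [c]).filter pvQ = u.filter pvQ := by
            simp [List.filter_append, hq]
          have hih := ih (u ++ [c])
          rw [h1, h2] at hih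
          simpa using hih
      · -- consonant branch
        have hv' : ("aeiouAEIOU".toList.contains c) = false := by simpa using hv
        have hp : pvP c = false := by unfold pvP; rw [hv', Bool.and_false]
        have hq : pvQ c = true := by unfold pvQ; rw [hal, hv']; rfl
        by_cases hm : c ∈ u
        · have hmem : ((u.filter pvQ).map (fun c => String.ofList [c])).contains (String.ofList [c]) = true := by
            rw [pv_mk_mem_map]; exact pv_contains_filter_true u c pvQ hm hq
          simp only [hal, hv', if_true, Bool.false_eq_true, if_false, hmem,
            pv_add_of_mem u c hm]
          exact ih u
        · have hmem : ((u.filter pvQ).map (fun c => String.ofList [c])).contains (String.ofList [c]) = false := by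
            rw [pv_mk_mem_map]; exact pv_contains_filter_false u c pvQ hm
          simp only [hal, hv', if_true, Bool.false_eq_true, if_false, hmem,
            pv_add_of_not_mem u c hm]
          have h1 : (u ++ [c]).filter pvP = u.filter pvP := by
            simp [List.filter_append, hp]
          have h2 : (u ++ [c]).filter pvQ = u.filter pvQ ++ [c] := by
            simp [List.filter_append, hq]
          have hih := ih (u ++ [c])
          rw [h1, h2] at hih
          simpa using hih
    · -- non-alphabetic: A skips; both filters ignore c whether dedup adds it or not
      have hal' : PySem.Str.strIsalpha (String.ofList [c]) = false := by simpa using hal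
      have hp : pvP c = false := by unfold pvP; rw [hal', Bool.false_and]
      have hq : pvQ c = false := by unfold pvQ; rw [hal', Bool.false_and]
      have h1 : (PySem.Set.add u c).filter pvP = u.filter pvP := by
        by_cases hm : c ∈ u
        · rw [pv_add_of_mem u c hm]
        · rw [pv_add_of_not_mem u c hm]; simp [List.filter_append, hp]
      have h2 : (PySem.Set.add u c).filter pvQ = u.filter pvQ := by
        by_cases hm : c ∈ u
        · rw [pv_add_of_mem u c hm]
        · rw [pv_add_of_not_mem u c hm]; simp [List.filter_append, hq]
      simp only [hal', Bool.false_eq_true, if_false]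
      rw [← h1, ← h2]
      exact ih (PySem.Set.add u c)

-- ===== VERDICT (by name: the statement is the Claim_ definition above) =====
theorem vowels_consonants_spec : Claim_equal_vowels_consonants := by
  intro s _
  show _ = _
  unfold vowels_consonants vowels_consonants_alt
  have h := pv_loop s.toList []
  simp only [List.filter_nil, List.map_nil] at h
  rw [h]
  have hd : PySem.List.dedup s.toList = s.toList.foldl PySem.Set.add [] := by
    rw [PySem.List.dedup_eq_ofList, PySem.Set.ofList_eq_foldl]
  rw [hd]
  rfl
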